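-- pv_equiv track=rewrite | github.com/JannikGDev/AdventOfCode2019 | Task10/Task10.py | get_step_size
-- ===== SOURCE A (Python) =====
-- def get_step_size(observer, observed):
--     dx = observed[0] - observer[0]
--     dy = observed[1] - observer[1]
--
--     if dx == 0:
--         return [0, dy//abs(dy)]
--
--     if dy == 0:
--         return [dx//abs(dx),0]
--
--     denominator = 1
--     for i in range(2, min(abs(dx), abs(dy))+1):
--
--         if abs(dx) % i == 0 and abs(dy) % i == 0:
--             denominator = i
--
--     step_x = dx // denominator
--     step_y = dy // denominator
--
--     return [step_x, step_y]
-- ===== SOURCE B (Python) =====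
-- def get_step_size(observer, observed):
--     dx = observed[0] - observer[0]
--     dy = observed[1] - observer[1]
--     a, b = abs(dx), abs(dy)
--     while b:
--         a, b = b, a % b
--     return [dx // a, dy // a]
-- ===== Notes on version B (the rewrite author's own statement) =====
-- stated objective: simpler
-- what changed: Replaces the trial-division scan up to min(|dx|,|dy|) (plus the two zero-delta special branches) by a single Euclidean-gcd remainder loop followed by one division per coordinate.
import Mathlib
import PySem

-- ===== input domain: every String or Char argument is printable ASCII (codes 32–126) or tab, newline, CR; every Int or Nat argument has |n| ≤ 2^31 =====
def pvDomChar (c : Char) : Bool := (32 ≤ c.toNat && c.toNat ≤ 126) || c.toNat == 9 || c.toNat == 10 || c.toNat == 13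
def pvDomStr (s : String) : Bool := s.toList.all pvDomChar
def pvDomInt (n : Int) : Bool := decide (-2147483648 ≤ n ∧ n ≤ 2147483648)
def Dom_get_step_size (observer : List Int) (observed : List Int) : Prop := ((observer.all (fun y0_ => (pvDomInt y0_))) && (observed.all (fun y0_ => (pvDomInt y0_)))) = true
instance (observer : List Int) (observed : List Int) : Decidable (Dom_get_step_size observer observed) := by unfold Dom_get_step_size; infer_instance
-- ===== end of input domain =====

-- B replaces A's trial-division scan (and its zero-delta special branches) by a single
-- Euclidean-gcd loop; objective: simpler.

-- ===== PORT A =====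
def get_step_size (observer : List Int) (observed : List Int) : List Int :=
  let dx := PySem.List.pyGetD observed 0 0 - PySem.List.pyGetD observer 0 0
  let dy := PySem.List.pyGetD observed 1 0 - PySem.List.pyGetD observer 1 0
  if dx = 0 then [0, PySem.Int.floordiv dy |dy|]
  else if dy = 0 then [PySem.Int.floordiv dx |dx|, 0]
  else
    let denominator :=
      (PySem.List.pyRange 2 (min |dx| |dy| + 1) 1).foldl
        (fun d i => if PySem.Int.mod |dx| i = 0 ∧ PySem.Int.mod |dy| i = 0 then i else d) 1
    [PySem.Int.floordiv dx denominator, PySem.Int.floordiv dy denominator]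

-- ===== PORT B =====
-- the `while b: a, b = b, a % b` loop of Source B (both arguments are Python abs-values, hence Nat)
def euclidLoop (a b : Nat) : Nat :=
  if h : b = 0 then a else euclidLoop b (a % b)
decreasing_by exact Nat.mod_lt _ (Nat.pos_of_ne_zero h)

def get_step_size_alt (observer : List Int) (observed : List Int) : List Int :=
  let dx := PySem.List.pyGetD observed 0 0 - PySem.List.pyGetD observer 0 0
  let dy := PySem.List.pyGetD observed 1 0 - PySem.List.pyGetD observer 1 0
  let a := euclidLoop dx.natAbs dy.natAbs
  [PySem.Int.floordiv dx (a : Int), PySem.Int.floordiv dy (a : Int)]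

-- ===== PRECONDITION & SPEC =====
-- Pre_ excludes only inputs where the Python A raises: a list shorter than 2 (IndexError)
-- and observer = observed in both coordinates (ZeroDivisionError); B raises there too.
def Pre_get_step_size (observer : List Int) (observed : List Int) : Prop :=
  2 ≤ observer.length ∧ 2 ≤ observed.length ∧
  ¬ (observed.getD 0 0 - observer.getD 0 0 = 0 ∧ observed.getD 1 0 - observer.getD 1 0 = 0)
instance (observer : List Int) (observed : List Int) : Decidable (Pre_get_step_size observer observed) := by unfold Pre_get_step_size; infer_instance

def pvWitness_get_step_size : List Int × List Int := ([1, 1], [7, -3])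

def Spec_get_step_size (observer : List Int) (observed : List Int) (out : List Int) : Prop := out = get_step_size_alt observer observed
instance (observer : List Int) (observed : List Int) (out : List Int) : Decidable (Spec_get_step_size observer observed out) := by unfold Spec_get_step_size; infer_instance

-- ===== CLAIM (what is proved, stated in full; the proofs are below) =====
def Claim_equal_get_step_size : Prop := ∀ (observer : List Int) (observed : List Int), Dom_get_step_size observer observed → Pre_get_step_size observer observed → Spec_get_step_size observer observed (get_step_size observer observed)

-- ===== LEMMAS AND PROOFS =====

theorem euclidLoop_eq_gcd (a b : Nat) : euclidLoop a b = Nat.gcd a b := by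
  induction b using Nat.strong_induction_on generalizing a with
  | _ b ih =>
    rw [euclidLoop]
    by_cases h : b = 0
    · simp [h]
    · simp only [h, dite_false]
      rw [ih (a % b) (Nat.mod_lt _ (Nat.pos_of_ne_zero h)) b]
      rw [Nat.gcd_comm b (a % b), ← Nat.gcd_rec, Nat.gcd_comm]

-- the trial-division fold over 2..k+1 yields a common divisor of A and B that dominates
-- every positive common divisor ≤ k+1
theorem loop_inv (A B : Int) (k : Nat) :
    ∃ r : Int,
      (PySem.List.pyRange 2 ((k : Int) + 2) 1).foldl
        (fun d i => if PySem.Int.mod A i = 0 ∧ PySem.Int.mod B i = 0 then i else d) 1 = r ∧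
      r ∣ A ∧ r ∣ B ∧ 1 ≤ r ∧ r ≤ (k : Int) + 1 ∧
      (∀ j : Int, 0 < j → j ∣ A → j ∣ B → j ≤ (k : Int) + 1 → j ≤ r) := by
  induction k with
  | zero =>
    refine ⟨1, ?_, one_dvd _, one_dvd _, le_refl _, by norm_num, fun j _ _ _ hj => by simpa using hj⟩
    rw [PySem.List.pyRange_one_eq_nil (by norm_num)]
    rfl
  | succ k ih =>
    obtain ⟨r, hr, hrA, hrB, hr1, hrk, hmax⟩ := ih
    have hrange : PySem.List.pyRange 2 (((k : Int) + 1) + 2) 1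
        = PySem.List.pyRange 2 ((k : Int) + 2) 1 ++ [(k : Int) + 2] := by
      have := PySem.List.pyRange_one_succ_right (a := 2) (b := (k : Int) + 2) (by omega)
      simpa [add_assoc] using this
    have hc : ((k : Nat).succ : Int) + 2 = ((k : Int) + 1) + 2 := by push_cast; ring
    rw [hc, hrange, List.foldl_append, hr]
    simp only [List.foldl_cons, List.foldl_nil]
    by_cases hdvd : PySem.Int.mod A ((k : Int) + 2) = 0 ∧ PySem.Int.mod B ((k : Int) + 2) = 0
    · refine ⟨(k : Int) + 2, by simp [hdvd], ?_, ?_, by omega, by push_cast; omega, ?_⟩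
      · exact (PySem.Int.mod_eq_zero_iff_dvd A _).mp hdvd.1
      · exact (PySem.Int.mod_eq_zero_iff_dvd B _).mp hdvd.2
      · intro j _ _ _ hj; push_cast at hj ⊢; omega
    · refine ⟨r, by simp [hdvd], hrA, hrB, hr1, by push_cast; omega, ?_⟩
      intro j hj0 hjA hjB hj
      by_cases hje : j = (k : Int) + 2
      · exfalso; apply hdvd
        subst hje
        exact ⟨(PySem.Int.mod_eq_zero_iff_dvd A _).mpr hjA, (PySem.Int.mod_eq_zero_iff_dvd B _).mpr hjB⟩
      · exact hmax j hj0 hjA hjB (by push_cast at hj ⊢; omega)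

-- the fold computes the gcd when both deltas are nonzero
theorem loop_eq_gcd (dx dy : Int) (hx : dx ≠ 0) (hy : dy ≠ 0) :
    (PySem.List.pyRange 2 (min |dx| |dy| + 1) 1).foldl
      (fun d i => if PySem.Int.mod |dx| i = 0 ∧ PySem.Int.mod |dy| i = 0 then i else d) 1
    = (Nat.gcd dx.natAbs dy.natAbs : Int) := by
  set m : Int := min |dx| |dy| with hm
  have hax : 1 ≤ |dx| := Int.one_le_abs hx
  have hay : 1 ≤ |dy| := Int.one_le_abs hy
  have hm1 : 1 ≤ m := le_min hax hay
  have hk : ((m - 1).toNat : Int) + 2 = m + 1 := by omega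
  obtain ⟨r, hr, hrA, hrB, hr1, hrk, hmax⟩ := loop_inv |dx| |dy| (m - 1).toNat
  rw [hk] at hr
  rw [hr]
  set G : Int := (Nat.gcd dx.natAbs dy.natAbs : Int) with hG
  have hGx : G ∣ |dx| := by
    rw [hG, Int.abs_eq_natAbs]; exact_mod_cast Nat.gcd_dvd_left _ _
  have hGy : G ∣ |dy| := by
    rw [hG, Int.abs_eq_natAbs]; exact_mod_cast Nat.gcd_dvd_right _ _
  have hG0 : 0 < G := by
    have h0 : dx.natAbs ≠ 0 := by simpa using hx
    have : 0 < Nat.gcd dx.natAbs dy.natAbs := Nat.gcd_pos_of_pos_left _ (Nat.pos_of_ne_zero h0)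
    rw [hG]; exact_mod_cast this
  have hGm : G ≤ m := by
    have h1 : G ≤ |dx| := Int.le_of_dvd (by omega) hGx
    have h2 : G ≤ |dy| := Int.le_of_dvd (by omega) hGy
    exact le_min h1 h2
  have hGr : G ≤ r := by
    have := hmax G hG0 hGx hGy (by omega)
    omega
  have hrG : r ≤ G := by
    have hrx : (r.natAbs : Int) ∣ dx := Int.natAbs_dvd.mpr ((dvd_abs r dx).mp hrA)
    have hry : (r.natAbs : Int) ∣ dy := Int.natAbs_dvd.mpr ((dvd_abs r dy).mp hrB)
    have hd : r.natAbs ∣ Nat.gcd dx.natAbs dy.natAbs := by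
      simpa [Int.gcd] using Int.dvd_gcd hrx hry
    calc r ≤ (r.natAbs : Int) := Int.le_natAbs
      _ ≤ G := by rw [hG]; exact Int.ofNat_le.mpr (Nat.le_of_dvd (by rw [hG] at hG0; exact_mod_cast hG0) hd)
  omega

-- ===== VERDICT (by name: the statement is the Claim_ definition above) =====
theorem get_step_size_spec : Claim_equal_get_step_size := by
  intro observer observed _ hpre
  obtain ⟨h1, h2, hne⟩ := hpre
  unfold Spec_get_step_size get_step_size get_step_size_alt
  have e00 : PySem.List.pyGetD observed 0 0 = observed.getD 0 0 := PySem.List.pyGetD_zero _ _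
  have e01 : PySem.List.pyGetD observer 0 0 = observer.getD 0 0 := PySem.List.pyGetD_zero _ _
  have e10 : PySem.List.pyGetD observed 1 0 = observed.getD 1 0 :=
    PySem.List.pyGetD_ofNat' observed 1 0
  have e11 : PySem.List.pyGetD observer 1 0 = observer.getD 1 0 :=
    PySem.List.pyGetD_ofNat' observer 1 0
  rw [e00, e01, e10, e11]
  set dx : Int := observed.getD 0 0 - observer.getD 0 0 with hdx
  set dy : Int := observed.getD 1 0 - observer.getD 1 0 with hdy
  by_cases hx : dx = 0
  · -- A's dx = 0 branch; B: gcd 0 b = b = |dy|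
    have hy : dy ≠ 0 := fun h => hne ⟨hx, h⟩
    have hb : 0 < (dy.natAbs : Int) := by
      exact_mod_cast Nat.pos_of_ne_zero (by simpa using hy)
    have h0 : PySem.Int.floordiv 0 (dy.natAbs : Int) = 0 := by
      rw [PySem.Int.floordiv_eq_ediv_of_pos hb]; simp
    simp only [hx, if_true, Int.natAbs_zero, euclidLoop_eq_gcd, Nat.gcd_zero_left, h0,
      Int.abs_eq_natAbs]
  · by_cases hy : dy = 0
    · have ha : 0 < (dx.natAbs : Int) := by
        exact_mod_cast Nat.pos_of_ne_zero (by simpa using hx)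
      have h0 : PySem.Int.floordiv 0 (dx.natAbs : Int) = 0 := by
        rw [PySem.Int.floordiv_eq_ediv_of_pos ha]; simp
      simp only [hx, if_false, hy, if_true, Int.natAbs_zero, euclidLoop_eq_gcd,
        Nat.gcd_zero_right, h0, Int.abs_eq_natAbs]
    · simp only [hx, hy, if_false]
      rw [loop_eq_gcd dx dy hx hy, euclidLoop_eq_gcd]
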